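-- pv_equiv track=rewrite | github.com/Omeo13/pdeffer_backend | png_ocr.py | group_cells
-- ===== SOURCE A (Python) =====
-- def group_cells(cells, row_tol=10):
--     rows = []
--     for cell in sorted(cells, key=lambda b: b[1]):
--         y1 = cell[1]
--         for row in rows:
--             if abs(row[0][1] - y1) < row_tol:
--                 row.append(cell)
--                 break
--         else:
--             rows.append([cell])
--     for row in rows:
--         row.sort(key=lambda b: b[0])
--     return rows
-- ===== SOURCE B (Python) =====
-- def _bisect_right(a, x):
--     # first index i with a[i] > x in a nondecreasing list (hand-rolled: no imports in A's module)
--     lo, hi = 0, len(a)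
--     while lo < hi:
--         mid = (lo + hi) // 2
--         if x < a[mid]:
--             hi = mid
--         else:
--             lo = mid + 1
--     return lo
--
--
-- def group_cells(cells, row_tol=10):
--     # One sorted sweep; row anchor y-values are nondecreasing, so the first row
--     # within tolerance is found by binary search instead of scanning all rows.
--     anchors = []  # y of the first cell of each row, nondecreasing
--     rows = []
--     for cell in sorted(cells, key=lambda b: b[1]):
--         i = _bisect_right(anchors, cell[1] - row_tol)
--         if i < len(rows):
--             rows[i].append(cell)
--         else:
--             anchors.append(cell[1])
--             rows.append([cell])
--     return [sorted(row, key=lambda b: b[0]) for row in rows]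
-- ===== Notes on version B (the rewrite author's own statement) =====
-- stated objective: alternative
-- what changed: A scans the whole rows list linearly for each cell; B exploits that row-anchor y-values are nondecreasing during the sorted sweep and binary-searches the anchor list instead, appending into the found row by index.
import Mathlib
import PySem

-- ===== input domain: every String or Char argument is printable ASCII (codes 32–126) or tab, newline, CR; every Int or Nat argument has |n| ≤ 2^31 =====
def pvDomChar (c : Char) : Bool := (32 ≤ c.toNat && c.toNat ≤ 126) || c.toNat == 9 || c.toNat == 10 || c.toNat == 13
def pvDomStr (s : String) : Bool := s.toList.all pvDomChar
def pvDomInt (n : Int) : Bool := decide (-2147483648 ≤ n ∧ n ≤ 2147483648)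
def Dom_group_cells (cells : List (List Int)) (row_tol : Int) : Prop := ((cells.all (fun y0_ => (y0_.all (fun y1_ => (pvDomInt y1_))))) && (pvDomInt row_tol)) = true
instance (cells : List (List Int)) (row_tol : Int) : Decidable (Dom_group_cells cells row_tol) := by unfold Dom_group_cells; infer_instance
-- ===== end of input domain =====

-- B replaces A's linear scan of all existing rows per cell by a binary search over the
-- (nondecreasing) list of row-anchor y-values.

-- ===== PORT A =====
-- inner 'for row in rows: … break / else: append' loop of A
def pvScan (row_tol y1 : Int) (cell : List Int) : List (List (List Int)) → List (List (List Int))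
  | [] => [[cell]]
  | row :: rest =>
    if |PySem.List.pyGetD (PySem.List.pyGetD row 0 []) 1 0 - y1| < row_tol then
      (row ++ [cell]) :: rest
    else
      row :: pvScan row_tol y1 cell rest

def group_cells (cells : List (List Int)) (row_tol : Int) : List (List (List Int)) :=
  let rows := (PySem.List.sorted cells (fun b => PySem.List.pyGetD b 1 0)).foldl
    (fun rows cell => pvScan row_tol (PySem.List.pyGetD cell 1 0) cell rows) []
  rows.map (fun row => PySem.List.sorted row (fun b => PySem.List.pyGetD b 0 0))

-- ===== PORT B =====
-- _bisect_right of Source B; a[mid] is in range whenever hi ≤ a.length (so getD is exact there)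
def pvBisect (a : List Int) (x : Int) (lo hi : Nat) : Nat :=
  if lo < hi then
    let mid := (lo + hi) / 2
    if x < a.getD mid 0 then pvBisect a x lo mid else pvBisect a x (mid + 1) hi
  else lo
termination_by hi - lo
decreasing_by all_goals omega

-- body of B's sweep loop, state = (anchors, rows)
def pvStep (row_tol : Int) (st : List Int × List (List (List Int))) (cell : List Int) :
    List Int × List (List (List Int)) :=
  let y1 := PySem.List.pyGetD cell 1 0
  let i := pvBisect st.1 (y1 - row_tol) 0 st.1.length
  if i < st.2.length then (st.1, st.2.modify i (fun row => row ++ [cell]))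
  else (st.1 ++ [y1], st.2 ++ [[cell]])

def group_cells_alt (cells : List (List Int)) (row_tol : Int) : List (List (List Int)) :=
  let st := (PySem.List.sorted cells (fun b => PySem.List.pyGetD b 1 0)).foldl
    (pvStep row_tol) ([], [])
  st.2.map (fun row => PySem.List.sorted row (fun b => PySem.List.pyGetD b 0 0))

-- ===== PRECONDITION & SPEC =====
-- Pre_ excludes exactly the inputs on which Python A raises IndexError: some cell with
-- fewer than 2 entries (cell[1] / b[1] / b[0] are accessed).
def Pre_group_cells (cells : List (List Int)) (row_tol : Int) : Prop :=
  ∀ c ∈ cells, 2 ≤ c.length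
instance (cells : List (List Int)) (row_tol : Int) : Decidable (Pre_group_cells cells row_tol) := by
  unfold Pre_group_cells; infer_instance

def pvWitness_group_cells : List (List Int) × Int := ([[4, 3], [0, 0], [7, 50]], 10)

def Spec_group_cells (cells : List (List Int)) (row_tol : Int) (out : List (List (List Int))) : Prop := out = group_cells_alt cells row_tol
instance (cells : List (List Int)) (row_tol : Int) (out : List (List (List Int))) : Decidable (Spec_group_cells cells row_tol out) := by unfold Spec_group_cells; infer_instance

-- ===== CLAIM (what is proved, stated in full; the proofs are below) =====
def Claim_equal_group_cells : Prop := ∀ (cells : List (List Int)) (row_tol : Int), Dom_group_cells cells row_tol → Pre_group_cells cells row_tol → Spec_group_cells cells row_tol (group_cells cells row_tol)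

-- ===== LEMMAS AND PROOFS =====

-- y-anchor of a row: row[0][1]
def pvRowY (row : List (List Int)) : Int :=
  PySem.List.pyGetD (PySem.List.pyGetD row 0 []) 1 0

-- y-key of a cell: cell[1]
def pvKey (b : List Int) : Int := PySem.List.pyGetD b 1 0

theorem pvBisect_eq_findIdx_aux (a : List Int) (x : Int)
    (hpw : a.Pairwise (· ≤ ·)) (n lo hi : Nat) (hn : hi - lo ≤ n) (hlohi : lo ≤ hi)
    (hhi : hi ≤ a.length)
    (hlo : ∀ j, j < lo → (hj : j < a.length) → a[j] ≤ x)
    (hup : ∀ j, hi ≤ j → (hj : j < a.length) → x < a[j]) :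
    pvBisect a x lo hi = a.findIdx (fun v => decide (x < v)) := by
  induction n generalizing lo hi with
  | zero =>
    have he : lo = hi := by omega
    rw [pvBisect]
    simp only [if_neg (by omega : ¬ lo < hi)]
    by_cases hl : lo < a.length
    · symm
      apply (List.findIdx_eq hl).mpr
      refine ⟨by simpa using hup lo (by omega) hl, ?_⟩
      intro j hj
      simpa using hlo j hj (by omega)
    · symm
      have hlen : lo = a.length := by omega
      rw [hlen, List.findIdx_eq_length]
      intro v hv
      obtain ⟨j, hj, rfl⟩ := List.mem_iff_getElem.mp hv
      simpa using hlo j (by omega) hj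
  | succ n ih =>
    by_cases hlt : lo < hi
    · rw [pvBisect]
      simp only [if_pos hlt]
      have hmid1 : (lo + hi) / 2 < hi := by omega
      have hmid2 : lo ≤ (lo + hi) / 2 := by omega
      have hmlen : (lo + hi) / 2 < a.length := by omega
      rw [List.getD_eq_getElem a 0 hmlen]
      have hmono := List.pairwise_iff_getElem.mp hpw
      split_ifs with hcmp
      · refine ih lo ((lo + hi) / 2) (by omega) (by omega) (by omega) hlo ?_
        intro j hj hjl
        rcases Nat.eq_or_lt_of_le hj with h | h
        · exact h ▸ hcmp
        · exact lt_of_lt_of_le hcmp (hmono _ _ hmlen hjl h)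
      · push_neg at hcmp
        refine ih ((lo + hi) / 2 + 1) hi (by omega) (by omega) hhi ?_ hup
        intro j hj hjl
        rcases Nat.lt_or_ge j ((lo + hi) / 2) with h | h
        · exact le_trans (hmono _ _ hjl hmlen h) hcmp
        · have hje : j = (lo + hi) / 2 := by omega
          subst hje
          exact hcmp
    · exact ih lo hi (by omega) (by omega) hhi hlo hup

theorem pvBisect_eq_findIdx (a : List Int) (x : Int) (hpw : a.Pairwise (· ≤ ·)) :
    pvBisect a x 0 a.length = a.findIdx (fun v => decide (x < v)) :=
  pvBisect_eq_findIdx_aux a x hpw a.length 0 a.length (by omega) (Nat.zero_le _) le_rfl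
    (by omega) (fun j hj _ => absurd hj (by omega))

theorem findIdx_congr' {α : Type} (p q : α → Bool) (l : List α) (h : ∀ x ∈ l, p x = q x) :
    l.findIdx p = l.findIdx q := by
  induction l with
  | nil => rfl
  | cons a t ih =>
    simp only [List.findIdx_cons, h a (by simp)]
    rw [ih (fun x hx => h x (by simp [hx]))]

-- A's inner loop as a findIdx-directed update
theorem pvScan_eq (row_tol y1 : Int) (cell : List Int) (rows : List (List (List Int))) :
    pvScan row_tol y1 cell rows =
      (if rows.findIdx (fun row => decide (|pvRowY row - y1| < row_tol)) < rows.length then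
        rows.modify (rows.findIdx (fun row => decide (|pvRowY row - y1| < row_tol)))
          (fun r => r ++ [cell])
      else rows ++ [[cell]]) := by
  induction rows with
  | nil => simp [pvScan]
  | cons row rest ih =>
    rw [pvScan]
    simp only [List.findIdx_cons, pvRowY] at ih ⊢
    by_cases hp : |PySem.List.pyGetD (PySem.List.pyGetD row 0 []) 1 0 - y1| < row_tol
    · simp [hp]
    · simp only [hp, decide_false, cond_false, if_false]
      rw [ih]
      simp only [List.length_cons]
      split_ifs with h1 h2 <;> first | (exfalso; omega) | simp [List.modify_succ_cons] | rfl

theorem map_modify_eq (g : List (List Int) → Int) (f : List (List Int) → List (List Int))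
    (rows : List (List (List Int))) (i : Nat) (h : ∀ r ∈ rows, g (f r) = g r) :
    (rows.modify i f).map g = rows.map g := by
  induction rows generalizing i with
  | nil => simp
  | cons r rest ih =>
    cases i with
    | zero => simp [h r (by simp)]
    | succ n =>
      simp [List.modify_succ_cons, ih n (fun r' hr' => h r' (by simp [hr']))]

theorem pvRowY_append (r : List (List Int)) (cell : List Int) (h : r ≠ []) :
    pvRowY (r ++ [cell]) = pvRowY r := by
  cases r with
  | nil => exact absurd rfl h
  | cons a t => simp [pvRowY, PySem.List.pyGetD_zero_cons]

theorem pvRowY_single (cell : List Int) : pvRowY [cell] = pvKey cell := by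
  simp [pvRowY, pvKey, PySem.List.pyGetD_zero_cons]

-- one cell: B's bisect step equals A's scan, and the anchors stay the row anchors
theorem pvStep_eq (row_tol : Int) (cell : List Int) (rows : List (List (List Int)))
    (hne : ∀ r ∈ rows, r ≠ [])
    (hpw : (rows.map pvRowY).Pairwise (· ≤ ·))
    (hle : ∀ r ∈ rows, pvRowY r ≤ pvKey cell) :
    pvStep row_tol (rows.map pvRowY, rows) cell =
      ((pvScan row_tol (pvKey cell) cell rows).map pvRowY,
        pvScan row_tol (pvKey cell) cell rows) := by
  have hbis := pvBisect_eq_findIdx (rows.map pvRowY) (pvKey cell - row_tol) hpw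
  have hfidx : (rows.map pvRowY).findIdx (fun v => decide (pvKey cell - row_tol < v)) =
      rows.findIdx (fun row => decide (|pvRowY row - pvKey cell| < row_tol)) := by
    rw [List.findIdx_map]
    apply findIdx_congr'
    intro r hr
    have hr' := hle r hr
    have hiff : (pvKey cell - row_tol < pvRowY r) ↔ (|pvRowY r - pvKey cell| < row_tol) := by
      rw [abs_sub_lt_iff]; omega
    simp [Function.comp, hiff]
  rw [pvScan_eq]
  unfold pvStep
  rw [show PySem.List.pyGetD cell 1 0 = pvKey cell from rfl]
  simp only [List.length_map] at hbis ⊢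
  rw [hbis, hfidx]
  split_ifs with h
  · refine Prod.ext ?_ rfl
    symm
    apply map_modify_eq
    intro r hr
    exact pvRowY_append r cell (hne r hr)
  · simp [pvRowY_single]

theorem pvScan_ne_nil (row_tol y1 : Int) (cell : List Int) (rows : List (List (List Int)))
    (hne : ∀ r ∈ rows, r ≠ []) : ∀ r ∈ pvScan row_tol y1 cell rows, r ≠ [] := by
  induction rows with
  | nil => simp [pvScan]
  | cons row rest ih =>
    rw [pvScan]
    split_ifs with h
    · intro r hr
      rcases List.mem_cons.mp hr with rfl | hr
      · simp
      · exact hne r (by simp [hr])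
    · intro r hr
      rcases List.mem_cons.mp hr with rfl | hr
      · exact hne r (by simp)
      · exact ih (fun r' hr' => hne r' (by simp [hr'])) r hr

-- the anchor list after a scan: unchanged, or extended by the new cell's key
theorem pvScan_map (row_tol : Int) (cell : List Int) (rows : List (List (List Int)))
    (hne : ∀ r ∈ rows, r ≠ []) :
    (pvScan row_tol (pvKey cell) cell rows).map pvRowY = rows.map pvRowY ∨
      (pvScan row_tol (pvKey cell) cell rows).map pvRowY = rows.map pvRowY ++ [pvKey cell] := by
  rw [pvScan_eq]
  split_ifs with h
  · left
    apply map_modify_eq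
    intro r hr
    exact pvRowY_append r cell (hne r hr)
  · right
    simp [pvRowY_single]

-- main fold invariant
theorem pvFold_eq (row_tol : Int) (l : List (List Int))
    (hl : l.Pairwise (fun c d => pvKey c ≤ pvKey d)) :
    ∀ (rows : List (List (List Int))),
      (∀ r ∈ rows, r ≠ []) →
      (rows.map pvRowY).Pairwise (· ≤ ·) →
      (∀ a ∈ rows.map pvRowY, ∀ c ∈ l, a ≤ pvKey c) →
      l.foldl (pvStep row_tol) (rows.map pvRowY, rows) =
        ((l.foldl (fun rows cell => pvScan row_tol (pvKey cell) cell rows) rows).map pvRowY,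
          l.foldl (fun rows cell => pvScan row_tol (pvKey cell) cell rows) rows) := by
  induction l with
  | nil => intro rows _ _ _; rfl
  | cons cell rest ih =>
    intro rows hne hpw hle
    have hle1 : ∀ r ∈ rows, pvRowY r ≤ pvKey cell := by
      intro r hr
      exact hle (pvRowY r) (List.mem_map_of_mem hr) cell (by simp)
    simp only [List.foldl_cons]
    rw [pvStep_eq row_tol cell rows hne hpw hle1]
    have hl' := (List.pairwise_cons.mp hl).2
    have hhead := (List.pairwise_cons.mp hl).1
    have hne' := pvScan_ne_nil row_tol (pvKey cell) cell rows hne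
    rcases pvScan_map row_tol cell rows hne with hm | hm
    · exact ih hl' _ hne' (by rw [hm]; exact hpw)
        (by rw [hm]; intro a ha c hc; exact hle a ha c (by simp [hc]))
    · refine ih hl' _ hne' ?_ ?_
      · rw [hm]
        apply List.pairwise_append.mpr
        refine ⟨hpw, by simp, ?_⟩
        intro a ha b hb
        simp only [List.mem_singleton] at hb
        subst hb
        obtain ⟨r, hr, rfl⟩ := List.mem_map.mp ha
        exact hle1 r hr
      · rw [hm]
        intro a ha c hc
        rcases List.mem_append.mp ha with ha | ha
        · exact hle a ha c (by simp [hc])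
        · simp only [List.mem_singleton] at ha
          subst ha
          exact hhead c hc

-- ===== VERDICT (by name: the statement is the Claim_ definition above) =====
theorem group_cells_spec : Claim_equal_group_cells := by
  intro cells row_tol _ _
  unfold Spec_group_cells group_cells group_cells_alt
  have h := pvFold_eq row_tol (PySem.List.sorted cells (fun b => PySem.List.pyGetD b 1 0))
    (PySem.List.sorted_pairwise cells (fun b => PySem.List.pyGetD b 1 0))
    [] (by simp) (by simp) (by simp)
  simp only [List.map_nil] at h
  rw [h]
  rfl
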